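-- pv_equiv track=rewrite | github.com/Akshayan-N/Audit-Automation | filedata.py | mode_info
-- ===== SOURCE A (Python) =====
-- def mode_info(codes) :
--     all_permission = []
--     for code in codes:
--         code = int(code)
--         permissions = []
--         if (code // 4 == 1):
--             code-=4
--             permissions.append("read")
--         if (code // 2 == 1):
--             code-=2
--             permissions.append("write")
--         if (code == 1):
--             permissions.append("execute")
--         all_permission.append(permissions)
--     return all_permission
-- ===== SOURCE B (Python) =====
-- _TABLE = {
--     0: [], 1: ["execute"], 2: ["write"], 3: ["write", "execute"],
--     4: ["read"], 5: ["read", "execute"], 6: ["read", "write"],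
--     7: ["read", "write", "execute"],
-- }
--
-- def mode_info(codes):
--     return [list(_TABLE.get(int(code), [])) for code in codes]
-- ===== Notes on version B (the rewrite author's own statement) =====
-- stated objective: simpler
-- what changed: Replaced A's per-code subtract/floor-divide branch chain with a single precomputed 8-entry lookup table (default [] for codes outside 0..7) applied in one comprehension.
import Mathlib
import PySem

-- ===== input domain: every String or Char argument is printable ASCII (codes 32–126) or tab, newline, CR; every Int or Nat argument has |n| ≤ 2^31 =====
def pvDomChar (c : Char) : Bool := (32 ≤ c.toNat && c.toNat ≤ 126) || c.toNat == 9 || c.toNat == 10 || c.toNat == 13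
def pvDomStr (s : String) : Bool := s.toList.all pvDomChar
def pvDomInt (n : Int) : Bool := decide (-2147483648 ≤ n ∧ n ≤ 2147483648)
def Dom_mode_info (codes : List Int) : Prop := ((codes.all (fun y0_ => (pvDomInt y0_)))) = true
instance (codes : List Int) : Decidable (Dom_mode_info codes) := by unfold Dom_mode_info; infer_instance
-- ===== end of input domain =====

-- B replaces A's subtract/floor-divide branch chain with one precomputed 8-entry lookup table (objective: simpler).

-- ===== PORT A =====
-- literal transliteration of A: per code, three sequential if-branches mutating (code, permissions)
def mode_info_step (code : Int) : List String :=
  let permissions : List String := []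
  let s1 : Int × List String :=
    if PySem.Int.floordiv code 4 = 1 then (code - 4, permissions ++ ["read"]) else (code, permissions)
  let s2 : Int × List String :=
    if PySem.Int.floordiv s1.1 2 = 1 then (s1.1 - 2, s1.2 ++ ["write"]) else (s1.1, s1.2)
  if s2.1 = 1 then s2.2 ++ ["execute"] else s2.2

def mode_info (codes : List Int) : List (List String) :=
  codes.foldl (fun all_permission code => all_permission ++ [mode_info_step code]) []

-- ===== PORT B =====
-- the fixed table from Source B, as an association list (PySem.Dict)
def modeTable : PySem.Dict Int (List String) :=
  PySem.Dict.mk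
    [((0:Int), ([] : List String)), (1, ["execute"]), (2, ["write"]), (3, ["write", "execute"]),
     (4, ["read"]), (5, ["read", "execute"]), (6, ["read", "write"]),
     (7, ["read", "write", "execute"])]

def mode_info_alt (codes : List Int) : List (List String) :=
  codes.map (fun code => PySem.Dict.getD modeTable code [])

-- ===== PRECONDITION & SPEC =====
def Spec_mode_info (codes : List Int) (out : List (List String)) : Prop := out = mode_info_alt codes
instance (codes : List Int) (out : List (List String)) : Decidable (Spec_mode_info codes out) := by unfold Spec_mode_info; infer_instance

-- ===== CLAIM (what is proved, stated in full; the proofs are below) =====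
def Claim_equal_mode_info : Prop := ∀ (codes : List Int), Dom_mode_info codes → Spec_mode_info codes (mode_info codes)

-- ===== LEMMAS AND PROOFS =====
theorem mode_info_step_eq (c : Int) :
    mode_info_step c = PySem.Dict.getD modeTable c [] := by
  by_cases hc0 : 0 ≤ c ∧ c < 8
  · obtain ⟨h0, h8⟩ := hc0
    interval_cases c <;> decide
  · have h4 : PySem.Int.floordiv c 4 = 1 ↔ 4 ≤ c ∧ c < 8 := by
      rw [PySem.Int.floordiv_eq_iff_of_pos (by omega)]; omega
    have h2 : PySem.Int.floordiv c 2 = 1 ↔ 2 ≤ c ∧ c < 4 := by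
      rw [PySem.Int.floordiv_eq_iff_of_pos (by omega)]; omega
    have e4 : ¬ (PySem.Int.floordiv c 4 = 1) := by rw [h4]; omega
    have e2 : ¬ (PySem.Int.floordiv c 2 = 1) := by rw [h2]; omega
    have e1 : c ≠ 1 := by omega
    have hk : ∀ k : Int, 0 ≤ k → k < 8 → (k == c) = false := by
      intro k hk1 hk2
      simp only [beq_eq_false_iff_ne, ne_eq]
      omega
    have etab : PySem.Dict.getD modeTable c [] = [] := by
      simp [modeTable, PySem.Dict.getD, PySem.Dict.get?,
        hk 0 (by omega) (by omega), hk 1 (by omega) (by omega), hk 2 (by omega) (by omega),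
        hk 3 (by omega) (by omega), hk 4 (by omega) (by omega), hk 5 (by omega) (by omega),
        hk 6 (by omega) (by omega), hk 7 (by omega) (by omega)]
    rw [etab]
    simp only [mode_info_step, e4, e2, e1, if_false]

theorem foldl_append_map {α β : Type} (g : α → β) (l : List α) (acc : List β) :
    l.foldl (fun a c => a ++ [g c]) acc = acc ++ l.map g := by
  induction l generalizing acc with
  | nil => simp
  | cons x xs ih => simp [List.foldl, ih]

-- ===== VERDICT (by name: the statement is the Claim_ definition above) =====
theorem mode_info_spec : Claim_equal_mode_info := by
  intro codes _
  unfold Spec_mode_info mode_info mode_info_alt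
  rw [foldl_append_map]
  simp [List.map_congr_left fun c _ => mode_info_step_eq c]
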